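-- pv_equiv track=rewrite | github.com/rasikasrimal/CompetitiveProgramming | CSES/Python3/Introductory Problems/Apple Division.py | apple_division
-- ===== SOURCE A (Python) =====
-- def apple_division(n, p):
--     total_sum = sum(p)
--     min_diff = float('inf')
--     for i in range(1, 1 << n):
--         curr_sum = 0
--         for j in range(n):
--             if i & (1 << j):
--                 curr_sum += p[j]
--         min_diff = min(min_diff, abs(total_sum - 2 * curr_sum))
--     return min_diff
-- ===== SOURCE B (Python) =====
-- def apple_division(n, p):
--     # Subset sums by doubling: sums[i] is the sum over the bits of i, so
--     # sums[1:] are exactly the non-empty subset sums of the first n apples.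
--     total = sum(p)
--     sums = [0]
--     for x in p[:n]:
--         sums += [s + x for s in sums]
--     return min(abs(total - 2 * s) for s in sums[1:])
-- ===== Notes on version B (the rewrite author's own statement) =====
-- stated objective: alternative
-- what changed: Replaces the bitmask double loop (for each of the 2^n masks, an inner scan over all n bits) by a list-doubling enumeration of subset sums (sums += [s+x for s in sums]), removing the inner per-bit loop; Pre_ excludes n=0 (A returns float('inf'), not an int) and n outside [1, len(p)] (A raises).
-- outside the precondition, e.g. on apple_division(0, [3]): A returns inf, B raises ValueError
import Mathlib
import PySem

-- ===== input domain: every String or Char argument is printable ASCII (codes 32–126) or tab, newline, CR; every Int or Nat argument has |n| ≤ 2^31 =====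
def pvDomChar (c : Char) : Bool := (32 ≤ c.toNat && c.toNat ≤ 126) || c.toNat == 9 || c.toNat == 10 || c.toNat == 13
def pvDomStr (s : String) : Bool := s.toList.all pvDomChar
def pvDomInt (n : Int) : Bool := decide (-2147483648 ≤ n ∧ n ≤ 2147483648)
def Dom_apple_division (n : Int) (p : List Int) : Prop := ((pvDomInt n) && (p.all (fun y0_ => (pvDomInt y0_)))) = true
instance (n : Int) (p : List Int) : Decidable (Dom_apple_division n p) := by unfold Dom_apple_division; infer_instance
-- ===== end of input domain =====

-- B replaces A's bitmask double loop by a list-doubling enumeration of subset sums (no inner per-bit scan).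

-- ===== PORT A =====
-- Literal port of A.  min_diff = float('inf') is modelled as `none` (Option Int);
-- under Pre_ (n ≥ 1) the outer loop runs at least once, so the result is `some`.
-- `1 << n` / `1 << j` are ported as `1 <<< ·.toNat`, exact for the nonnegative
-- shift amounts that occur under Pre_ (Python raises for negative ones).
-- `p[j]` is ported as pyGetD _ _ 0; under Pre_ every index j < n ≤ len(p) is in range.
def apple_division (n : Int) (p : List Int) : Int :=
  let total_sum := p.sum
  let min_diff : Option Int :=
    (PySem.List.pyRange 1 (1 <<< n.toNat) 1).foldl
      (fun md i =>
        let curr_sum :=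
          (PySem.List.pyRange 0 n 1).foldl
            (fun c j =>
              if PySem.Int.band i (1 <<< j.toNat) ≠ 0 then c + PySem.List.pyGetD p j 0
              else c) 0
        let v := |total_sum - 2 * curr_sum|
        some (match md with | none => v | some m => min m v)) none
  min_diff.getD 0

-- ===== PORT B =====
-- Literal port of B (Source B): subset sums by doubling, then min over sums[1:].
-- min() of the generator is ported as head/tail foldl; [] cannot occur under Pre_.
def apple_division_alt (n : Int) (p : List Int) : Int :=
  let total := p.sum
  let sums := (PySem.List.slice p none (some n)).foldl
      (fun acc x => acc ++ acc.map (fun s => s + x)) [0]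
  match (sums.drop 1).map (fun s => |total - 2 * s|) with
  | [] => 0
  | h :: t => t.foldl min h

-- ===== PRECONDITION & SPEC =====
-- Pre_ excludes n = 0 (A returns float('inf'), not an int), n < 0 (A raises
-- ValueError on the negative shift) and n > len(p) (A raises IndexError).
def Pre_apple_division (n : Int) (p : List Int) : Prop :=
  1 ≤ n ∧ n ≤ (p.length : Int)
instance (n : Int) (p : List Int) : Decidable (Pre_apple_division n p) := by
  unfold Pre_apple_division; infer_instance

def pvWitness_apple_division : Int × List Int := (2, [3, 7, 5])

def Spec_apple_division (n : Int) (p : List Int) (out : Int) : Prop := out = apple_division_alt n p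
instance (n : Int) (p : List Int) (out : Int) : Decidable (Spec_apple_division n p out) := by unfold Spec_apple_division; infer_instance

-- ===== CLAIM (what is proved, stated in full; the proofs are below) =====
def Claim_equal_apple_division : Prop := ∀ (n : Int) (p : List Int), Dom_apple_division n p → Pre_apple_division n p → Spec_apple_division n p (apple_division n p)

-- ===== LEMMAS AND PROOFS =====

-- bSum xs i: sum of xs[j] over the set bits j of i (low bit ↔ head).
def bSum : List Int → Nat → Int
  | [], _ => 0
  | x :: xs, i => (if i % 2 = 1 then x else 0) + bSum xs (i / 2)

theorem bSum_concat (xs : List Int) (x : Int) (i : Nat) :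
    bSum (xs ++ [x]) i = bSum xs i + (if Nat.testBit i xs.length then x else 0) := by
  induction xs generalizing i with
  | nil =>
    simp [bSum, Nat.testBit_zero]
  | cons y ys ih =>
    simp [bSum, ih, Nat.testBit_succ, add_assoc]

theorem bSum_add_pow (xs : List Int) (i : Nat) :
    bSum xs (i + 2 ^ xs.length) = bSum xs i := by
  induction xs generalizing i with
  | nil => simp [bSum]
  | cons x xs ih =>
    have h1 : (i + 2 ^ (xs.length + 1)) % 2 = i % 2 := by
      simp only [pow_succ]; omega
    have h2 : (i + 2 ^ (xs.length + 1)) / 2 = i / 2 + 2 ^ xs.length := by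
      simp only [pow_succ]; omega
    simp [bSum, h1, h2, ih]

-- The doubling fold lists all subset sums, indexed by bitmask.
def dbl (xs : List Int) : List Int :=
  xs.foldl (fun acc x => acc ++ acc.map (fun s => s + x)) [0]

theorem dbl_eq (xs : List Int) :
    dbl xs = (List.range (2 ^ xs.length)).map (bSum xs) := by
  induction xs using List.reverseRecOn with
  | nil => simp [dbl, bSum]
  | append_singleton ys x ih =>
    have hstep : dbl (ys ++ [x]) = dbl ys ++ (dbl ys).map (fun s => s + x) := by
      simp [dbl]
    rw [hstep, ih]
    have hrange : List.range (2 ^ (ys ++ [x]).length)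
        = List.range (2 ^ ys.length) ++ (List.range (2 ^ ys.length)).map (fun k => 2 ^ ys.length + k) := by
      simp only [List.length_append, List.length_singleton, pow_succ]
      rw [Nat.mul_two, List.range_add]
    rw [hrange, List.map_append, List.map_map, List.map_map]
    congr 1
    · apply List.map_congr_left
      intro i hi
      rw [List.mem_range] at hi
      rw [bSum_concat, Nat.testBit_lt_two_pow hi]
      simp
    · apply List.map_congr_left
      intro i hi
      rw [List.mem_range] at hi
      simp only [Function.comp_apply]
      rw [bSum_concat]
      have hb : Nat.testBit (2 ^ ys.length + i) ys.length = true := by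
        rw [Nat.testBit_two_pow_add_eq, Nat.testBit_lt_two_pow hi]; rfl
      rw [hb, Nat.add_comm (2 ^ ys.length) i, bSum_add_pow]
      simp [add_comm]

-- Odd/even split of a bitmask test: n & 2^i ≠ 0 is bit i of n.
theorem and_two_pow_ne_zero (n i : Nat) : (n &&& 2 ^ i ≠ 0) ↔ n.testBit i := by
  rw [Nat.and_two_pow]
  rcases h : n.testBit i <;> simp

theorem one_shiftLeft_int (k : Nat) : (1 <<< k : Int) = ((2 ^ k : Nat) : Int) := by
  simp [Int.shiftLeft_eq]

-- A's inner fold computes bSum of the first k elements at bitmask i.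
theorem inner_eq (p : List Int) (k : Nat) (hk : k ≤ p.length) (i : Nat) :
    (PySem.List.pyRange 0 (k : Int) 1).foldl
        (fun c j =>
          if PySem.Int.band (i : Int) (1 <<< j.toNat) ≠ 0 then c + PySem.List.pyGetD p j 0
          else c) 0
      = bSum (p.take k) i := by
  induction k with
  | zero => simp [PySem.List.pyRange_one_eq_nil, bSum]
  | succ m ih =>
    have hm : m ≤ p.length := Nat.le_of_succ_le hk
    have hcast : ((m + 1 : Nat) : Int) = (m : Int) + 1 := by push_cast; ring
    rw [hcast, PySem.List.pyRange_one_succ_right (by positivity), List.foldl_append,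
      ih hm]
    have hget : PySem.List.pyGetD p ((m : Nat) : Int) 0 = p.getD m 0 :=
      PySem.List.pyGetD_natCast p m 0
    have hmlt : m < p.length := hk
    have htake : p.take (m + 1) = p.take m ++ [p.getD m 0] := by
      rw [List.take_add_one, List.getElem?_eq_getElem hmlt]
      simp [List.getD, List.getElem?_eq_getElem hmlt]
    rw [htake, bSum_concat]
    have hlen : (p.take m).length = m := List.length_take_of_le hm
    have hband : (PySem.Int.band (i : Int) (1 <<< ((m : Int)).toNat) ≠ 0) ↔ Nat.testBit i m := by
      rw [show ((m : Int)).toNat = m from Int.toNat_natCast m, one_shiftLeft_int,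
        PySem.Int.band_natCast]
      rw [show ((((i : Nat) &&& 2 ^ m : Nat)) : Int) ≠ 0 ↔ ((i &&& 2 ^ m : Nat) ≠ 0) by
        exact_mod_cast Iff.rfl]
      exact and_two_pow_ne_zero i m
    simp only [List.foldl_cons, List.foldl_nil, hlen, hget]
    by_cases h : Nat.testBit i m
    · rw [if_pos (hband.mpr h), if_pos h]
    · rw [if_neg (fun hc => h (hband.mp hc)), if_neg (by simp [h]), add_zero]

-- Folding Python's min over an Option accumulator (None = inf).
theorem foldl_optmin (f : Int → Int) (l : List Int) (a : Int) :
    l.foldl (fun md i => some (match md with | none => f i | some m => min m (f i))) (some a)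
      = some ((l.map f).foldl min a) := by
  induction l generalizing a with
  | nil => simp
  | cons h t ih => simp [List.foldl_cons, ih]

theorem optmin_eq (f : Int → Int) (l : List Int) :
    (l.foldl (fun md i => some (match md with | none => f i | some m => min m (f i))) none).getD 0
      = (match l.map f with | [] => 0 | h :: t => t.foldl min h) := by
  cases l with
  | nil => simp
  | cons h t => simp [List.foldl_cons, foldl_optmin]

-- ===== VERDICT =====
theorem apple_division_spec : Claim_equal_apple_division := by
  intro n p _ hpre
  obtain ⟨h1, h2⟩ := hpre
  unfold Spec_apple_division apple_division apple_division_alt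
  have hkn : ((n.toNat : Nat) : Int) = n := Int.toNat_of_nonneg (by omega)
  set k := n.toNat with hkdef
  have hk1 : 1 ≤ k := by omega
  have hklen : k ≤ p.length := by
    have := h2; rw [← hkn] at this; exact_mod_cast this
  -- B's slice and doubling fold
  rw [show PySem.List.slice p none (some n) = p.take k by
    rw [← hkn]; exact PySem.List.slice_to_natCast p k]
  have hdbl : (p.take k).foldl (fun acc x => acc ++ acc.map (fun s => s + x)) [0]
      = (List.range (2 ^ k)).map (bSum (p.take k)) := by
    have := dbl_eq (p.take k)
    rw [List.length_take_of_le hklen] at this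
    exact this
  rw [hdbl]
  -- A's outer range
  rw [one_shiftLeft_int k, PySem.List.pyRange_one 1 ((2 ^ k : Nat) : Int)]
  rw [optmin_eq]
  -- the two value lists coincide
  have hm2 : 2 ^ k = (2 ^ k - 1) + 1 := by
    have : 1 ≤ 2 ^ k := Nat.one_le_two_pow
    omega
  have hlist :
      (((List.range (((2 ^ k : Nat) : Int) - 1).toNat).map (fun t : Nat => (1 : Int) + t)).map
          (fun i => |p.sum - 2 *
            (PySem.List.pyRange 0 n 1).foldl
              (fun c j =>
                if PySem.Int.band i (1 <<< j.toNat) ≠ 0 then c + PySem.List.pyGetD p j 0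
                else c) 0|))
        = (((List.range (2 ^ k)).map (bSum (p.take k))).drop 1).map
            (fun s => |p.sum - 2 * s|) := by
    rw [show (((2 ^ k : Nat) : Int) - 1).toNat = 2 ^ k - 1 by omega]
    rw [hm2, List.range_succ_eq_map]
    simp only [List.map_cons, List.drop_succ_cons, List.drop_zero]
    rw [List.map_map, List.map_map, List.map_map]
    apply List.map_congr_left
    intro t _
    simp only [Function.comp_apply]
    have : ((1 : Int) + (t : Int)) = (((t + 1 : Nat) : Nat) : Int) := by push_cast; ring
    rw [this, ← hkn, inner_eq p k hklen (t + 1)]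
  rw [hlist]
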